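-- pv_equiv track=rewrite | github.com/maxbergmark/misc-scripts | codereview/codereview_triangles.py | create_triangle_array
-- ===== SOURCE A (Python) =====
-- def create_triangle_array(n):
-- 	arr = [[' ' for i in range(4*n)] for j in range(2*n)]
-- 	for i in range(2*n):
-- 		arr[i][2*n-i-1] = '/'
-- 		arr[i][2*n+i] = '\\'
-- 	for i in range(n, 2*n):
-- 		arr[i][i] = '\\'
-- 		arr[i][4*n-i-1] = '/'
-- 	for i in range(2*n-2):
-- 		arr[n-1][n+1+i] = '_'
-- 		arr[2*n-1][2*n+1+i] = '_'
-- 		arr[2*n-1][1+i] = '_'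
-- 	return '\n'.join([''.join(row) for row in arr])
-- ===== SOURCE B (Python) =====
-- def create_triangle_array(n):
-- 	rows = []
-- 	for i in range(n):
-- 		fill = '_' if i == n - 1 else ' '
-- 		rows.append(' ' * (2*n - i - 1) + '/' + fill * (2*i) + '\\' + ' ' * (2*n - i - 1))
-- 	for i in range(n, 2*n):
-- 		fill = '_' if i == 2*n - 1 else ' '
-- 		rows.append(' ' * (2*n - i - 1) + '/' + fill * (2*(i - n)) + '\\'
-- 			+ ' ' * (4*n - 2*i - 2) + '/' + fill * (2*(i - n)) + '\\' + ' ' * (2*n - i - 1))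
-- 	return '\n'.join(rows)
-- ===== Notes on version B (the rewrite author's own statement) =====
-- stated objective: alternative
-- what changed: Replaces A's mutable 2D grid (blank cell-by-cell fill plus four in-place marking sweeps, then join) by a closed-form per-row construction that concatenates repeated-character segments directly.
import Mathlib
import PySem

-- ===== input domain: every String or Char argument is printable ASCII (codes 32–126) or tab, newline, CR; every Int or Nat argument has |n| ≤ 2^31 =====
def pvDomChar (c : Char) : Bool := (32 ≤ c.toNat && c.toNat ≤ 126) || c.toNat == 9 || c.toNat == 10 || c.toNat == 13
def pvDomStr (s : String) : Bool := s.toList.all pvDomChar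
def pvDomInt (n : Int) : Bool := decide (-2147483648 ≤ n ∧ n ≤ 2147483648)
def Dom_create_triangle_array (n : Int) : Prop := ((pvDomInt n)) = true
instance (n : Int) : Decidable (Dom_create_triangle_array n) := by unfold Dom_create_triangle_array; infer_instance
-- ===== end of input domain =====

-- B drops A's mutable 2D grid and its four marking sweeps: each row is a closed-form
-- concatenation of repeated-character segments (objective: alternative decomposition, no 2D grid).

-- ===== PORT A =====

-- arr[i][j] = c : read row i, set column j, write row back.  Every assignment A performs has a
-- nonnegative in-range index (established by the proofs below), so these total forms are exact.
def setRC (a : List (List Char)) (i j : Int) (c : Char) : List (List Char) :=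
  PySem.List.pySetD a i (PySem.List.pySetD (PySem.List.pyGetD a i ([] : List Char)) j c)

-- arr = [[' ' for i in range(4*n)] for j in range(2*n)]
def ctaInit (n : Int) : List (List Char) :=
  (PySem.List.pyRange 0 (2*n) 1).map (fun _ => (PySem.List.pyRange 0 (4*n) 1).map (fun _ => ' '))

-- for i in range(2*n): arr[i][2*n-i-1] = '/'; arr[i][2*n+i] = '\\'
def ctaLoop1 (n : Int) (arr : List (List Char)) : List (List Char) :=
  (PySem.List.pyRange 0 (2*n) 1).foldl (fun a i =>
    setRC (setRC a i (2*n - i - 1) '/') i (2*n + i) '\\') arr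

-- for i in range(n, 2*n): arr[i][i] = '\\'; arr[i][4*n-i-1] = '/'
def ctaLoop2 (n : Int) (arr : List (List Char)) : List (List Char) :=
  (PySem.List.pyRange n (2*n) 1).foldl (fun a i =>
    setRC (setRC a i i '\\') i (4*n - i - 1) '/') arr

-- for i in range(2*n-2): arr[n-1][n+1+i] = '_'; arr[2*n-1][2*n+1+i] = '_'; arr[2*n-1][1+i] = '_'
def ctaLoop3 (n : Int) (arr : List (List Char)) : List (List Char) :=
  (PySem.List.pyRange 0 (2*n - 2) 1).foldl (fun a i =>
    setRC (setRC (setRC a (n-1) (n+1+i) '_') (2*n-1) (2*n+1+i) '_') (2*n-1) (1+i) '_') arr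

-- return '\n'.join([''.join(row) for row in arr])
def create_triangle_array (n : Int) : String :=
  PySem.Str.join "\n" ((ctaLoop3 n (ctaLoop2 n (ctaLoop1 n (ctaInit n)))).map
    (fun row => PySem.Str.join "" (row.map (fun c => String.ofList [c]))))

-- ===== PORT B =====

-- ' ' * k  is  List.replicate k.toNat ' '  (Python repetition of a negative count is empty, as toNat is)
def altTopRow (n i : Int) : List Char :=
  List.replicate (2*n - i - 1).toNat ' ' ++ ['/']
    ++ List.replicate (2*i).toNat (if i = n - 1 then '_' else ' ') ++ ['\\']
    ++ List.replicate (2*n - i - 1).toNat ' '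

def altBotRow (n i : Int) : List Char :=
  List.replicate (2*n - i - 1).toNat ' ' ++ ['/']
    ++ List.replicate (2*(i - n)).toNat (if i = 2*n - 1 then '_' else ' ') ++ ['\\']
    ++ List.replicate (4*n - 2*i - 2).toNat ' ' ++ ['/']
    ++ List.replicate (2*(i - n)).toNat (if i = 2*n - 1 then '_' else ' ') ++ ['\\']
    ++ List.replicate (2*n - i - 1).toNat ' '

def create_triangle_array_alt (n : Int) : String :=
  PySem.Str.join "\n"
    ((PySem.List.pyRange 0 n 1).map (fun i => String.ofList (altTopRow n i))
      ++ (PySem.List.pyRange n (2*n) 1).map (fun i => String.ofList (altBotRow n i)))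

-- ===== PRECONDITION & SPEC =====
def Spec_create_triangle_array (n : Int) (out : String) : Prop := out = create_triangle_array_alt n
instance (n : Int) (out : String) : Decidable (Spec_create_triangle_array n out) := by unfold Spec_create_triangle_array; infer_instance

-- ===== CLAIM (what is proved, stated in full; the proofs are below) =====
def Claim_equal_create_triangle_array : Prop := ∀ (n : Int), Dom_create_triangle_array n → Spec_create_triangle_array n (create_triangle_array n)

-- ===== LEMMAS AND PROOFS =====

-- closed-form value of cell (i,j) of A's finished grid (proof-side characterization)
def pvCell (n i j : Int) : Char :=
  if j = 2*n - i - 1 ∨ (i ≥ n ∧ j = 4*n - i - 1) then '/'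
  else if j = 2*n + i ∨ (i ≥ n ∧ j = i) then '\\'
  else if i = n - 1 ∧ (n + 1 ≤ j ∧ j ≤ 3*n - 2) then '_'
  else if i = 2*n - 1 ∧ ((1 ≤ j ∧ j ≤ 2*n - 2) ∨ (2*n + 1 ≤ j ∧ j ≤ 4*n - 2)) then '_'
  else ' '

-- cell (i,j) of a grid, with blank defaults (all reads the proofs perform are in range)
def gridGet (a : List (List Char)) (i j : Int) : Char :=
  PySem.List.pyGetD (PySem.List.pyGetD a i ([] : List Char)) j ' '

def Shape (n : Int) (a : List (List Char)) : Prop :=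
  a.length = (2*n).toNat ∧ ∀ r ∈ a, r.length = (4*n).toNat

theorem shape_setRC {n : Int} {a : List (List Char)} {i : Int} (j : Int) (c : Char)
    (h : Shape n a) (hi : 0 ≤ i) (hi2 : i < 2*n) : Shape n (setRC a i j c) := by
  obtain ⟨h1, h2⟩ := h
  unfold setRC
  rw [PySem.List.pySetD_of_nonneg _ _ hi]
  refine ⟨by simpa using h1, ?_⟩
  intro r hr
  rcases List.mem_or_eq_of_mem_set hr with hmem | heq
  · exact h2 r hmem
  · subst heq
    rw [PySem.List.length_pySetD]
    exact h2 _ (PySem.List.pyGetD_mem _ _ (by constructor <;> omega))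

theorem gridGet_setRC {n : Int} {a : List (List Char)} (h : Shape n a)
    {i j : Int} (c : Char) (hi : 0 ≤ i) (hi2 : i < 2*n) (hj : 0 ≤ j) (hj2 : j < 4*n)
    {i' j' : Int} (hi' : 0 ≤ i') (hj' : 0 ≤ j') :
    gridGet (setRC a i j c) i' j' = if i' = i ∧ j' = j then c else gridGet a i' j' := by
  obtain ⟨h1, h2⟩ := h
  unfold setRC gridGet
  have hcast : i = ((i.toNat : Nat) : Int) := by omega
  have hcast' : i' = ((i'.toNat : Nat) : Int) := by omega
  have hjcast : j = ((j.toNat : Nat) : Int) := by omega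
  have hjcast' : j' = ((j'.toNat : Nat) : Int) := by omega
  have hrowmem : PySem.List.pyGetD a i ([] : List Char) ∈ a :=
    PySem.List.pyGetD_mem _ _ (by constructor <;> omega)
  have hrowlen : (PySem.List.pyGetD a i ([] : List Char)).length = (4*n).toNat := h2 _ hrowmem
  rw [hcast, hcast', PySem.List.pyGetD_pySetD_natCast _ _ _ _ _ (by omega)]
  by_cases hii : i'.toNat = i.toNat
  · have heqi : i' = i := by omega
    rw [if_pos hii, ← hcast, hjcast, hjcast',
      PySem.List.pyGetD_pySetD_natCast _ _ _ _ _ (by omega), ← hjcast, ← hjcast']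
    by_cases hjj : j' = j
    · rw [if_pos (by omega), if_pos ⟨by omega, hjj⟩]
    · rw [if_neg (by omega), if_neg (by simp [hjj]), ← hcast', heqi]
  · rw [if_neg hii, if_neg (by omega), ← hcast']

theorem foldl_gridGet {n : Int} (L : List Int) (step : List (List Char) → Int → List (List Char))
    (i j : Int) (P : Int → Prop) [DecidablePred P] (c : Char)
    (hInv : ∀ g k, Shape n g → k ∈ L → Shape n (step g k))
    (h : ∀ g k, Shape n g → k ∈ L → gridGet (step g k) i j = if P k then c else gridGet g i j) :
    ∀ g, Shape n g →
      gridGet (L.foldl step g) i j = if ∃ k ∈ L, P k then c else gridGet g i j := by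
  induction L with
  | nil => intro g hg; simp
  | cons a L ih =>
    intro g hg
    have hstep := h g a hg (by simp)
    rw [List.foldl_cons,
      ih (fun g k hgk hk => hInv g k hgk (by simp [hk])) (fun g k hgk hk => h g k hgk (by simp [hk]))
        _ (hInv g a hg (by simp))]
    by_cases hPa : P a
    · rw [if_pos (show ∃ k ∈ a :: L, P k from ⟨a, by simp, hPa⟩)]
      by_cases hex : ∃ k ∈ L, P k
      · rw [if_pos hex]
      · rw [if_neg hex, hstep, if_pos hPa]
    · rw [hstep, if_neg hPa]
      by_cases hex : ∃ k ∈ L, P k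
      · rw [if_pos hex, if_pos (by rcases hex with ⟨k, hk, hPk⟩; exact ⟨k, by simp [hk], hPk⟩)]
      · have hnot : ¬∃ k ∈ a :: L, P k := by
          rintro ⟨k, hk, hPk⟩
          rcases List.mem_cons.mp hk with rfl | hk2
          · exact hPa hPk
          · exact hex ⟨k, hk2, hPk⟩
        rw [if_neg hex, if_neg hnot]

theorem shape_foldl {n : Int} (L : List Int) (step : List (List Char) → Int → List (List Char))
    (hInv : ∀ g k, Shape n g → k ∈ L → Shape n (step g k)) :
    ∀ g, Shape n g → Shape n (L.foldl step g) := by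
  induction L with
  | nil => intro g hg; simpa using hg
  | cons a L ih =>
    intro g hg
    exact ih (fun g k hgk hk => hInv g k hgk (by simp [hk])) _ (hInv g a hg (by simp))

theorem shape_init (n : Int) : Shape n (ctaInit n) := by
  constructor
  · simp [ctaInit, PySem.List.length_pyRange_one]
  · intro r hr
    rcases List.mem_map.mp hr with ⟨k, _, rfl⟩
    simp [PySem.List.length_pyRange_one]

theorem gridGet_init (n i j : Int) : gridGet (ctaInit n) i j = ' ' := by
  unfold gridGet ctaInit
  have hrow : ∀ (r : List Char), (∀ c ∈ r, c = ' ') → PySem.List.pyGetD r j ' ' = ' ' := by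
    intro r hr
    rcases h : PySem.List.pyGet? r j with _ | c
    · exact PySem.List.pyGetD_of_none _ _ _ h
    · have hin : PySem.Raise.InRange r.length j := by
        by_contra hn
        have hnone := (PySem.List.pyGet?_eq_none_iff r j).mpr hn
        rw [h] at hnone
        simp at hnone
      exact hr _ (PySem.List.pyGetD_mem _ _ hin)
  rcases h : PySem.List.pyGet? ((PySem.List.pyRange 0 (2*n) 1).map
      (fun _ => (PySem.List.pyRange 0 (4*n) 1).map (fun _ => ' '))) i with _ | r
  · rw [PySem.List.pyGetD_of_none _ _ _ h]
    exact hrow [] (by simp)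
  · have hmem := PySem.List.mem_of_pyGet?_eq_some _ h
    rcases List.mem_map.mp hmem with ⟨k, _, hrk⟩
    have : PySem.List.pyGetD ((PySem.List.pyRange 0 (2*n) 1).map
        (fun _ => (PySem.List.pyRange 0 (4*n) 1).map (fun _ => ' '))) i ([] : List Char) = r := by
      unfold PySem.List.pyGetD
      rw [h]
      rfl
    rw [this]
    apply hrow
    intro c hc
    rcases List.mem_map.mp (hrk ▸ hc) with ⟨m, _, rfl⟩
    rfl

theorem shape_loop1 (n : Int) {g : List (List Char)} (hg : Shape n g) : Shape n (ctaLoop1 n g) := by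
  apply shape_foldl _ _ _ _ hg
  intro g k hgk hk
  rw [PySem.List.mem_pyRange_one] at hk
  exact shape_setRC _ _ (shape_setRC _ _ hgk (by omega) (by omega)) (by omega) (by omega)

theorem shape_loop2 (n : Int) {g : List (List Char)} (hg : Shape n g) : Shape n (ctaLoop2 n g) := by
  apply shape_foldl _ _ _ _ hg
  intro g k hgk hk
  rw [PySem.List.mem_pyRange_one] at hk
  exact shape_setRC _ _ (shape_setRC _ _ hgk (by omega) (by omega)) (by omega) (by omega)

theorem shape_loop3 (n : Int) {g : List (List Char)} (hg : Shape n g) : Shape n (ctaLoop3 n g) := by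
  apply shape_foldl _ _ _ _ hg
  intro g k hgk hk
  rw [PySem.List.mem_pyRange_one] at hk
  exact shape_setRC _ _ (shape_setRC _ _ (shape_setRC _ _ hgk (by omega) (by omega))
    (by omega) (by omega)) (by omega) (by omega)

theorem gridGet_loop1 (n : Int) {g : List (List Char)} (hg : Shape n g)
    {i j : Int} (hi : 0 ≤ i) (hj : 0 ≤ j) :
    gridGet (ctaLoop1 n g) i j =
      if 0 ≤ i ∧ i < 2*n ∧ (j = 2*n - i - 1 ∨ j = 2*n + i) then
        (if j = 2*n - i - 1 then '/' else '\\')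
      else gridGet g i j := by
  unfold ctaLoop1
  rw [foldl_gridGet _ _ i j (fun k => k = i ∧ (j = 2*n - k - 1 ∨ j = 2*n + k)) _
    ?_ ?_ _ hg]
  · by_cases hex : ∃ k ∈ PySem.List.pyRange 0 (2*n) 1, k = i ∧ (j = 2*n - k - 1 ∨ j = 2*n + k)
    · rcases hex with ⟨k, hk, rfl, hd⟩
      rw [PySem.List.mem_pyRange_one] at hk
      rw [if_pos ⟨k, by rw [PySem.List.mem_pyRange_one]; omega, rfl, hd⟩, if_pos (by omega)]
    · rw [if_neg hex, if_neg (by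
        rintro ⟨_, h2, h3⟩
        exact hex ⟨i, by rw [PySem.List.mem_pyRange_one]; omega, rfl, h3⟩)]
  · intro g k hgk hk
    rw [PySem.List.mem_pyRange_one] at hk
    exact shape_setRC _ _ (shape_setRC _ _ hgk (by omega) (by omega)) (by omega) (by omega)
  · intro g k hgk hk
    rw [PySem.List.mem_pyRange_one] at hk
    rw [gridGet_setRC (shape_setRC _ _ hgk (by omega) (by omega)) _ (by omega) (by omega)
        (by omega) (by omega) hi hj,
      gridGet_setRC hgk _ (by omega) (by omega) (by omega) (by omega) hi hj]
    split_ifs <;> first | rfl | omega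

theorem gridGet_loop2 (n : Int) {g : List (List Char)} (hg : Shape n g)
    {i j : Int} (hi : 0 ≤ i) (hj : 0 ≤ j) :
    gridGet (ctaLoop2 n g) i j =
      if n ≤ i ∧ i < 2*n ∧ (j = i ∨ j = 4*n - i - 1) then
        (if j = i then '\\' else '/')
      else gridGet g i j := by
  unfold ctaLoop2
  rw [foldl_gridGet _ _ i j (fun k => k = i ∧ (j = k ∨ j = 4*n - k - 1)) _
    ?_ ?_ _ hg]
  · by_cases hex : ∃ k ∈ PySem.List.pyRange n (2*n) 1, k = i ∧ (j = k ∨ j = 4*n - k - 1)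
    · rcases hex with ⟨k, hk, rfl, hd⟩
      rw [PySem.List.mem_pyRange_one] at hk
      rw [if_pos ⟨k, by rw [PySem.List.mem_pyRange_one]; omega, rfl, hd⟩, if_pos (by omega)]
    · rw [if_neg hex, if_neg (by
        rintro ⟨_, h2, h3⟩
        exact hex ⟨i, by rw [PySem.List.mem_pyRange_one]; omega, rfl, h3⟩)]
  · intro g k hgk hk
    rw [PySem.List.mem_pyRange_one] at hk
    exact shape_setRC _ _ (shape_setRC _ _ hgk (by omega) (by omega)) (by omega) (by omega)
  · intro g k hgk hk
    rw [PySem.List.mem_pyRange_one] at hk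
    rw [gridGet_setRC (shape_setRC _ _ hgk (by omega) (by omega)) _ (by omega) (by omega)
        (by omega) (by omega) hi hj,
      gridGet_setRC hgk _ (by omega) (by omega) (by omega) (by omega) hi hj]
    split_ifs <;> first | rfl | omega

theorem gridGet_loop3 (n : Int) {g : List (List Char)} (hg : Shape n g)
    {i j : Int} (hi : 0 ≤ i) (hj : 0 ≤ j) :
    gridGet (ctaLoop3 n g) i j =
      if (i = n - 1 ∧ n + 1 ≤ j ∧ j ≤ 3*n - 2) ∨
         (i = 2*n - 1 ∧ ((2*n + 1 ≤ j ∧ j ≤ 4*n - 2) ∨ (1 ≤ j ∧ j ≤ 2*n - 2))) then '_'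
      else gridGet g i j := by
  unfold ctaLoop3
  rw [foldl_gridGet _ _ i j (fun k =>
      (i = n - 1 ∧ j = n + 1 + k) ∨ (i = 2*n - 1 ∧ (j = 2*n + 1 + k ∨ j = 1 + k))) _
    ?_ ?_ _ hg]
  · by_cases hex : ∃ k ∈ PySem.List.pyRange 0 (2*n - 2) 1,
        (i = n - 1 ∧ j = n + 1 + k) ∨ (i = 2*n - 1 ∧ (j = 2*n + 1 + k ∨ j = 1 + k))
    · rcases hex with ⟨k, hk, hd⟩
      rw [PySem.List.mem_pyRange_one] at hk
      rw [if_pos ⟨k, by rw [PySem.List.mem_pyRange_one]; omega, hd⟩, if_pos (by omega)]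
    · rw [if_neg hex, if_neg ?_]
      rintro (⟨h1, h2, h3⟩ | ⟨h1, (⟨h2, h3⟩ | ⟨h2, h3⟩)⟩)
      · exact hex ⟨j - n - 1, by rw [PySem.List.mem_pyRange_one]; omega, Or.inl ⟨h1, by omega⟩⟩
      · exact hex ⟨j - 2*n - 1, by rw [PySem.List.mem_pyRange_one]; omega,
          Or.inr ⟨h1, Or.inl (by omega)⟩⟩
      · exact hex ⟨j - 1, by rw [PySem.List.mem_pyRange_one]; omega,
          Or.inr ⟨h1, Or.inr (by omega)⟩⟩
  · intro g k hgk hk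
    rw [PySem.List.mem_pyRange_one] at hk
    exact shape_setRC _ _ (shape_setRC _ _ (shape_setRC _ _ hgk (by omega) (by omega))
      (by omega) (by omega)) (by omega) (by omega)
  · intro g k hgk hk
    rw [PySem.List.mem_pyRange_one] at hk
    rw [gridGet_setRC (shape_setRC _ _ (shape_setRC _ _ hgk (by omega) (by omega))
          (by omega) (by omega)) _ (by omega) (by omega) (by omega) (by omega) hi hj,
      gridGet_setRC (shape_setRC _ _ hgk (by omega) (by omega)) _ (by omega) (by omega)
        (by omega) (by omega) hi hj,
      gridGet_setRC hgk _ (by omega) (by omega) (by omega) (by omega) hi hj]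
    split_ifs <;> first | rfl | omega

theorem gridGet_final (n : Int) {i j : Int} (hi : 0 ≤ i) (hi2 : i < 2*n)
    (hj : 0 ≤ j) (hj2 : j < 4*n) :
    gridGet (ctaLoop3 n (ctaLoop2 n (ctaLoop1 n (ctaInit n)))) i j = pvCell n i j := by
  rw [gridGet_loop3 n (shape_loop2 n (shape_loop1 n (shape_init n))) hi hj,
    gridGet_loop2 n (shape_loop1 n (shape_init n)) hi hj,
    gridGet_loop1 n (shape_init n) hi hj, gridGet_init]
  unfold pvCell
  split_ifs <;> first | rfl | omega

theorem grid_eq (n : Int) :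
    ctaLoop3 n (ctaLoop2 n (ctaLoop1 n (ctaInit n))) =
      (PySem.List.pyRange 0 (2*n) 1).map (fun i => (PySem.List.pyRange 0 (4*n) 1).map (pvCell n i)) := by
  have hs : Shape n (ctaLoop3 n (ctaLoop2 n (ctaLoop1 n (ctaInit n)))) :=
    shape_loop3 n (shape_loop2 n (shape_loop1 n (shape_init n)))
  obtain ⟨h1, h2⟩ := hs
  apply List.ext_getElem
  · simp [h1, PySem.List.length_pyRange_one]
  · intro k hk1 hk2
    have hk : k < (2*n).toNat := by simpa [h1] using hk1
    have hrow : (ctaLoop3 n (ctaLoop2 n (ctaLoop1 n (ctaInit n))))[k].length = (4*n).toNat :=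
      h2 _ (List.getElem_mem hk1)
    rw [List.getElem_map, PySem.List.getElem_pyRange_one]
    apply List.ext_getElem
    · simp [hrow, PySem.List.length_pyRange_one]
    · intro m hm1 hm2
      have hm : m < (4*n).toNat := by simpa [hrow] using hm1
      rw [List.getElem_map, PySem.List.getElem_pyRange_one]
      have := gridGet_final n (i := (k : Int)) (j := (m : Int))
        (by omega) (by omega) (by omega) (by omega)
      rw [show (0:Int) + (k:Int) = (k:Int) by omega, show (0:Int) + (m:Int) = (m:Int) by omega,
        ← this]
      unfold gridGet
      have hg1 : PySem.List.pyGetD (ctaLoop3 n (ctaLoop2 n (ctaLoop1 n (ctaInit n))))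
          ((k : Nat) : Int) ([] : List Char) =
          (ctaLoop3 n (ctaLoop2 n (ctaLoop1 n (ctaInit n))))[((k : Nat) : Int).toNat] :=
        PySem.List.pyGetD_eq_getElem _ _ (by omega) (by omega)
      rw [hg1]
      rw [PySem.List.pyGetD_eq_getElem _ _ (by omega) (by simp; omega)]
      simp

-- a range on which f is constant maps to a replicate
theorem map_const_range (a b : Int) (c : Char) (f : Int → Char)
    (h : ∀ k, a ≤ k → k < b → f k = c) :
    (PySem.List.pyRange a b 1).map f = List.replicate (b - a).toNat c := by
  rw [List.map_congr_left (g := fun _ => c) (fun k hk => by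
      rw [PySem.List.mem_pyRange_one] at hk; exact h k hk.1 hk.2),
    List.map_const', PySem.List.length_pyRange_one]

theorem altTop_eq (n i : Int) (h0 : 0 ≤ i) (h1 : i < n) :
    (PySem.List.pyRange 0 (4*n) 1).map (pvCell n i) = altTopRow n i := by
  rw [PySem.List.pyRange_one_append 0 (2*n - i - 1) (4*n) (by omega) (by omega),
    PySem.List.pyRange_one_append (2*n - i - 1) (2*n - i) (4*n) (by omega) (by omega),
    PySem.List.pyRange_one_append (2*n - i) (2*n + i) (4*n) (by omega) (by omega),
    PySem.List.pyRange_one_append (2*n + i) (2*n + i + 1) (4*n) (by omega) (by omega)]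
  simp only [List.map_append]
  rw [map_const_range _ _ ' ' _ (by
      intro k hk1 hk2; unfold pvCell; split_ifs <;> first | rfl | omega),
    map_const_range _ _ '/' _ (by
      intro k hk1 hk2; unfold pvCell; split_ifs <;> first | rfl | omega),
    map_const_range _ _ (if i = n - 1 then '_' else ' ') _ (by
      intro k hk1 hk2; unfold pvCell; split_ifs <;> first | rfl | omega),
    map_const_range _ _ '\\' _ (by
      intro k hk1 hk2; unfold pvCell; split_ifs <;> first | rfl | omega),
    map_const_range _ _ ' ' _ (by
      intro k hk1 hk2; unfold pvCell; split_ifs <;> first | rfl | omega)]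
  unfold altTopRow
  rw [show (2*n - i - 1 - 0) = 2*n - i - 1 by ring,
    show (2*n - i - (2*n - i - 1)) = 1 by ring,
    show (2*n + i - (2*n - i)) = 2*i by ring,
    show (2*n + i + 1 - (2*n + i)) = 1 by ring,
    show (4*n - (2*n + i + 1)) = 2*n - i - 1 by ring]
  simp

theorem altBot_eq (n i : Int) (h0 : n ≤ i) (h1 : i < 2*n) :
    (PySem.List.pyRange 0 (4*n) 1).map (pvCell n i) = altBotRow n i := by
  rw [PySem.List.pyRange_one_append 0 (2*n - i - 1) (4*n) (by omega) (by omega),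
    PySem.List.pyRange_one_append (2*n - i - 1) (2*n - i) (4*n) (by omega) (by omega),
    PySem.List.pyRange_one_append (2*n - i) i (4*n) (by omega) (by omega),
    PySem.List.pyRange_one_append i (i + 1) (4*n) (by omega) (by omega),
    PySem.List.pyRange_one_append (i + 1) (4*n - i - 1) (4*n) (by omega) (by omega),
    PySem.List.pyRange_one_append (4*n - i - 1) (4*n - i) (4*n) (by omega) (by omega),
    PySem.List.pyRange_one_append (4*n - i) (2*n + i) (4*n) (by omega) (by omega),
    PySem.List.pyRange_one_append (2*n + i) (2*n + i + 1) (4*n) (by omega) (by omega)]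
  simp only [List.map_append]
  rw [map_const_range _ _ ' ' _ (by
      intro k hk1 hk2; unfold pvCell; split_ifs <;> first | rfl | omega),
    map_const_range _ _ '/' _ (by
      intro k hk1 hk2; unfold pvCell; split_ifs <;> first | rfl | omega),
    map_const_range _ _ (if i = 2*n - 1 then '_' else ' ') _ (by
      intro k hk1 hk2; unfold pvCell; split_ifs <;> first | rfl | omega),
    map_const_range _ _ '\\' _ (by
      intro k hk1 hk2; unfold pvCell; split_ifs <;> first | rfl | omega),
    map_const_range _ _ ' ' _ (by
      intro k hk1 hk2; unfold pvCell; split_ifs <;> first | rfl | omega),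
    map_const_range _ _ '/' _ (by
      intro k hk1 hk2; unfold pvCell; split_ifs <;> first | rfl | omega),
    map_const_range _ _ (if i = 2*n - 1 then '_' else ' ') _ (by
      intro k hk1 hk2; unfold pvCell; split_ifs <;> first | rfl | omega),
    map_const_range _ _ '\\' _ (by
      intro k hk1 hk2; unfold pvCell; split_ifs <;> first | rfl | omega),
    map_const_range _ _ ' ' _ (by
      intro k hk1 hk2; unfold pvCell; split_ifs <;> first | rfl | omega)]
  unfold altBotRow
  rw [show (2*n - i - 1 - 0) = 2*n - i - 1 by ring,
    show (2*n - i - (2*n - i - 1)) = 1 by ring,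
    show (i - (2*n - i)) = 2*(i - n) by ring,
    show (i + 1 - i) = 1 by ring,
    show (4*n - i - 1 - (i + 1)) = 4*n - 2*i - 2 by ring,
    show (4*n - i - (4*n - i - 1)) = 1 by ring,
    show (2*n + i - (4*n - i)) = 2*(i - n) by ring,
    show (2*n + i + 1 - (2*n + i)) = 1 by ring,
    show (4*n - (2*n + i + 1)) = 2*n - i - 1 by ring]
  simp

-- ''.join of the singleton strings of a row is the row itself
theorem render_row (row : List Char) :
    PySem.Str.join "" (row.map (fun c => String.ofList [c])) = String.ofList row := by
  apply String.ext
  show (PySem.Str.join "" (row.map (fun c => String.ofList [c]))).toList = _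
  rw [PySem.Str.toList_join]
  simp only [List.map_map]
  have : (List.map (String.toList ∘ fun c => String.ofList [c]) row) = row.map ([·]) := by
    apply List.map_congr_left
    intro c _
    simp
  rw [this]
  simp [PySem.Chars.join_nil_singletons row]

-- ===== VERDICT (by name: the statement is the Claim_ definition above) =====
theorem create_triangle_array_spec : Claim_equal_create_triangle_array := by
  intro n _
  unfold Spec_create_triangle_array create_triangle_array create_triangle_array_alt
  rw [grid_eq]
  by_cases hn : 0 ≤ n
  · rw [PySem.List.pyRange_one_append 0 n (2*n) (by omega) (by omega), List.map_append,
      List.map_append]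
    congr 1
    congr 1
    · rw [List.map_map]
      apply List.map_congr_left
      intro i hi
      rw [PySem.List.mem_pyRange_one] at hi
      simp only [Function.comp_apply]
      rw [altTop_eq n i hi.1 (by omega), render_row]
    · rw [List.map_map]
      apply List.map_congr_left
      intro i hi
      rw [PySem.List.mem_pyRange_one] at hi
      simp only [Function.comp_apply]
      rw [altBot_eq n i hi.1 hi.2, render_row]
  · rw [PySem.List.pyRange_one_eq_nil (by omega : (2*n) ≤ 0),
      PySem.List.pyRange_one_eq_nil (by omega : n ≤ (0:Int)),
      PySem.List.pyRange_one_eq_nil (by omega : (2*n) ≤ n)]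
    rfl
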